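-- pv_equiv track=rewrite | github.com/space-wizards/space-station-14 | Tools/actions_changelogs_since_last_run.py | group_entries_by_pr
-- ===== SOURCE A (Python) =====
-- from typing import Any, Iterable
--
-- ChangelogEntry = dict[str, Any]
--
-- def group_entries_by_pr(entries: Iterable[ChangelogEntry]) -> dict[str, list[ChangelogEntry]]:
--     groups: dict[str, list[ChangelogEntry]] = {}
--     for entry in entries:
--         url = entry.get("url", "")
--         if url and url.strip():
--             pr_number = url.rstrip("/").split("/")[-1]
--         else:
--             pr_number = "no-pr"
--         groups.setdefault(pr_number, []).append(entry)
--     return groups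
-- ===== SOURCE B (Python) =====
-- from typing import Any, Iterable
--
-- ChangelogEntry = dict[str, Any]
--
-- def group_entries_by_pr(entries: Iterable[ChangelogEntry]) -> dict[str, list[ChangelogEntry]]:
--     entries = list(entries)
--
--     def pr(entry: ChangelogEntry) -> str:
--         url = entry.get("url", "")
--         if url and url.strip():
--             return url.rstrip("/").split("/")[-1]
--         return "no-pr"
--
--     keys = [pr(e) for e in entries]
--     return {k: [e for e, k2 in zip(entries, keys) if k2 == k]
--             for k in dict.fromkeys(keys)}
-- ===== Notes on version B (the rewrite author's own statement) =====
-- stated objective: alternative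
-- what changed: Instead of a single pass maintaining a dict via setdefault+append, B precomputes the key of every entry, deduplicates the keys in first-occurrence order (dict.fromkeys), and builds each group with a per-key filter over the zipped (entry, key) list.
import Mathlib
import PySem

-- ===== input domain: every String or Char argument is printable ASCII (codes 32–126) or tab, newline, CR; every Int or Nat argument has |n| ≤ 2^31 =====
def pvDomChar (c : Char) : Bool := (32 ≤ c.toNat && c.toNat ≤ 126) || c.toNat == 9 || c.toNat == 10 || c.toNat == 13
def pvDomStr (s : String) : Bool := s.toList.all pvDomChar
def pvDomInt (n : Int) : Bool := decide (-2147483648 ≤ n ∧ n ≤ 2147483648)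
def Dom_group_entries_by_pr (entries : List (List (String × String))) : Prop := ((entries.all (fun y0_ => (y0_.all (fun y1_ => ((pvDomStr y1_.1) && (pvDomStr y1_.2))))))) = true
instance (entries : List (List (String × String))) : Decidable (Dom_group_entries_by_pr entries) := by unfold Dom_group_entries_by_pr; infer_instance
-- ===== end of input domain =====

-- B groups by precomputing every entry's key, deduplicating keys in first-occurrence
-- order, and filtering the entries per key — an alternative to A's single setdefault pass.


-- ===== PORT A =====
-- url.rstrip("/"): drop trailing '/' characters; hand port (PySem has no rstrip-with-chars), exact.
def pyRstripSlash (s : String) : String :=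
  String.ofList ((s.toList.reverse.dropWhile (fun c => c == '/')).reverse)

def group_entries_by_pr (entries : List (List (String × String))) : List (String × List (List (String × String))) :=
  (entries.foldl
    (fun (groups : PySem.Dict String (List (List (String × String)))) entry =>
      let url := (PySem.Dict.mk entry).getD "url" ""
      let pr_number :=
        if url ≠ "" ∧ PySem.Str.strip url ≠ "" then
          -- split("/") with nonempty sep is always `some` and nonempty; [-1] via pyGetD is exact
          PySem.List.pyGetD ((PySem.Str.split? (pyRstripSlash url) "/").getD []) (-1) ""
        else "no-pr"
      -- groups.setdefault(pr_number, []).append(entry) = groups[pr_number] = groups.get(pr_number, []) + [entry]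
      groups.modify pr_number [] (fun g => g ++ [entry]))
    PySem.Dict.empty).items

-- ===== PORT B =====
def prKey (entry : List (String × String)) : String :=
  let url := (PySem.Dict.mk entry).getD "url" ""
  if url ≠ "" ∧ PySem.Str.strip url ≠ "" then
    PySem.List.pyGetD ((PySem.Str.split? (pyRstripSlash url) "/").getD []) (-1) ""
  else "no-pr"

def group_entries_by_pr_alt (entries : List (List (String × String))) : List (String × List (List (String × String))) :=
  let keys := entries.map prKey
  -- dict.fromkeys(keys) iterated = first-occurrence dedup = PySem.List.dedup
  (PySem.List.dedup keys).map
    (fun k => (k, ((entries.zip keys).filter (fun p => p.2 == k)).map (fun p => p.1)))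

-- ===== PRECONDITION & SPEC =====
def Spec_group_entries_by_pr (entries : List (List (String × String))) (out : List (String × List (List (String × String)))) : Prop := out = group_entries_by_pr_alt entries
instance (entries : List (List (String × String))) (out : List (String × List (List (String × String)))) : Decidable (Spec_group_entries_by_pr entries out) := by unfold Spec_group_entries_by_pr; infer_instance

-- ===== CLAIM (what is proved, stated in full; the proofs are below) =====
def Claim_equal_group_entries_by_pr : Prop := ∀ (entries : List (List (String × String))), Dom_group_entries_by_pr entries → Spec_group_entries_by_pr entries (group_entries_by_pr entries)

-- ===== LEMMAS AND PROOFS =====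

-- A's loop step, written with prKey (definitionally equal to the inline lambda in the port).
def stepA (groups : PySem.Dict String (List (List (String × String))))
    (entry : List (String × String)) : PySem.Dict String (List (List (String × String))) :=
  groups.modify (prKey entry) [] (fun g => g ++ [entry])

lemma fold_pair (entries : List (List (String × String)))
    (d : PySem.Dict String (List (List (String × String)))) :
    entries.foldl stepA d
      = (entries.map (fun e => (prKey e, e))).foldl
          (fun d p => d.modify p.1 [] (fun g => g ++ [p.2])) d := by
  induction entries generalizing d with
  | nil => rfl
  | cons e es ih => simp [List.foldl_cons, stepA, ih]

lemma zip_map_self {α β : Type} (f : α → β) (l : List α) :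
    l.zip (l.map f) = l.map (fun x => (x, f x)) := by
  induction l with
  | nil => rfl
  | cons x xs ih => simp [ih]

lemma canonical (entries : List (List (String × String))) :
    (entries.foldl stepA PySem.Dict.empty).items
      = (PySem.List.dedup (entries.map prKey)).map
          (fun k => (k, entries.filter (fun e => prKey e == k))) := by
  rw [fold_pair]
  set l := entries.map (fun e => (prKey e, e)) with hl
  set d := l.foldl (fun d p => d.modify p.1 [] (fun g => g ++ [p.2])) PySem.Dict.empty with hd
  have hnd : d.keys.Nodup := by
    rw [hd]
    exact PySem.Dict.nodup_keys_foldl_modify_key l (fun p => p.1) []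
      (fun _ p => fun g => g ++ [p.2]) PySem.Dict.empty (by simp [PySem.Dict.empty])
  have hkeys : d.keys = PySem.List.dedup (entries.map prKey) := by
    rw [hd]
    rw [PySem.Dict.keys_foldl_modify_key l (fun p => p.1) []
      (fun _ p => fun g => g ++ [p.2]) PySem.Dict.empty]
    simp [hl, PySem.Dict.empty, PySem.Set.update_nil_left, List.map_map,
      PySem.List.dedup_eq_ofList, Function.comp_def]
  have hget : ∀ k, d.getD k [] = entries.filter (fun e => prKey e == k) := by
    intro k
    rw [hd, PySem.Dict.getD_foldl_modify_append l PySem.Dict.empty k]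
    simp [hl, PySem.Dict.empty, PySem.Dict.getD, PySem.Dict.get?, List.filter_map, List.map_map, Function.comp_def]
  rw [PySem.Dict.items_eq_map_keys d hnd [], hkeys]
  exact List.map_congr_left (fun k _ => by rw [hget k])

lemma alt_canonical (entries : List (List (String × String))) :
    group_entries_by_pr_alt entries
      = (PySem.List.dedup (entries.map prKey)).map
          (fun k => (k, entries.filter (fun e => prKey e == k))) := by
  unfold group_entries_by_pr_alt
  refine List.map_congr_left (fun k _ => ?_)
  rw [zip_map_self prKey entries]
  simp [List.filter_map, List.map_map, Function.comp_def]

-- ===== VERDICT (by name: the statement is the Claim_ definition above) =====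
theorem group_entries_by_pr_spec : Claim_equal_group_entries_by_pr := by
  intro entries _
  show group_entries_by_pr entries = group_entries_by_pr_alt entries
  show (entries.foldl stepA PySem.Dict.empty).items = group_entries_by_pr_alt entries
  rw [canonical, alt_canonical]
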